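-- pv_equiv track=rewrite | github.com/hilakhadad/ElectricPatterns | identification_analysis/src/metrics/confidence_scoring.py | _compute_dominant_phases
-- ===== SOURCE A (Python) =====
-- from collections import defaultdict
-- from typing import Dict, Any, List, Optional
--
-- def _compute_dominant_phases(matched: List[Dict]) -> Dict[str, str]:
--     """Find the most common phase for each device type."""
--     phase_counts = defaultdict(lambda: defaultdict(int))
--     for a in matched:
--         dtype = a.get('device_type', 'unclassified')
--         phase = a.get('phase', '')
--         if dtype != 'unclassified' and phase:
--             phase_counts[dtype][phase] += 1
--
--     dominant = {}
--     for dtype, counts in phase_counts.items():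
--         if counts:
--             dominant[dtype] = max(counts, key=counts.get)
--
--     return dominant
-- ===== SOURCE B (Python) =====
-- def _compute_dominant_phases(matched):
--     """Find the most common phase for each device type."""
--     pairs = [(a.get('device_type', 'unclassified'), a.get('phase', ''))
--              for a in matched]
--     pairs = [dp for dp in pairs if dp[0] != 'unclassified' and dp[1]]
--     dominant = {}
--     for dtype, _ in pairs:
--         if dtype not in dominant:
--             phases = [p for d, p in pairs if d == dtype]
--             best, best_count = '', 0
--             for p in phases:
--                 c = phases.count(p)
--                 if c > best_count:
--                     best, best_count = p, c
--             dominant[dtype] = best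
--     return dominant
-- ===== Notes on version B (the rewrite author's own statement) =====
-- stated objective: alternative
-- what changed: Drops all counting tables: B materialises the filtered (device_type, phase) pair list, then for each device type (first-appearance order) extracts its phase sub-list and picks the winner by a running-best scan using list.count per candidate, with strict > so the first-seen phase wins ties as in A's max().
import Mathlib
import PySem

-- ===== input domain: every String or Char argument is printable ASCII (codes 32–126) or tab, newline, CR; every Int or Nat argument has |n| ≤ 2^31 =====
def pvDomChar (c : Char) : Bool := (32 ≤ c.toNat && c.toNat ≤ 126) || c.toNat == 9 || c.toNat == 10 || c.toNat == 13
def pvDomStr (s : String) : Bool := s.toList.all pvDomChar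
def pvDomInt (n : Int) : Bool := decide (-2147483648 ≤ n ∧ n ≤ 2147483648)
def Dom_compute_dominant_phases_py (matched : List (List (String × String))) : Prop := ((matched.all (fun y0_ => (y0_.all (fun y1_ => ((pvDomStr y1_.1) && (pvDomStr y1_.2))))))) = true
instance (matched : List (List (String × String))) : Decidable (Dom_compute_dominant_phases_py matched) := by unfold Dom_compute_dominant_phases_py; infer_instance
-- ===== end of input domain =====

-- B drops A's counting dictionaries entirely: it filters the (device_type, phase) pairs once,
-- then for each device type picks the winner by a running-best scan over that type's phase
-- sub-list using list.count per candidate (alternative decomposition; quadratic, not faster).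

-- ===== PORT A =====
def compute_dominant_phases_py (matched : List (List (String × String))) : List (String × String) :=
  let phase_counts : PySem.Dict String (PySem.Dict String Int) :=
    matched.foldl (fun pc a =>
      let dtype := (PySem.Dict.mk a).getD "device_type" "unclassified"
      let phase := (PySem.Dict.mk a).getD "phase" ""
      if dtype ≠ "unclassified" ∧ phase ≠ "" then
        pc.modify dtype PySem.Dict.empty (fun inner => inner.modify phase 0 (· + 1))
      else pc) PySem.Dict.empty
  let dominant : PySem.Dict String String :=
    phase_counts.items.foldl (fun dom p =>
      if p.2.size ≠ 0 then
        match PySem.List.max? p.2.keys (fun k => p.2.getD k 0) with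
        | some m => dom.insert p.1 m
        | none => dom
      else dom) PySem.Dict.empty
  dominant.items

-- ===== PORT B =====
def compute_dominant_phases_py_alt (matched : List (List (String × String))) : List (String × String) :=
  let pairs0 := matched.map (fun a =>
    ((PySem.Dict.mk a).getD "device_type" "unclassified", (PySem.Dict.mk a).getD "phase" ""))
  let pairs := pairs0.filter (fun dp => decide (dp.1 ≠ "unclassified" ∧ dp.2 ≠ ""))
  let dominant : PySem.Dict String String :=
    pairs.foldl (fun dom q =>
      if dom.contains q.1 then dom
      else
        let phases := (pairs.filter (fun r => r.1 == q.1)).map Prod.snd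
        let best := phases.foldl (fun b p =>
          let c : Int := (phases.count p : Int)
          if b.2 < c then (p, c) else b) ("", (0 : Int))
        dom.insert q.1 best.1) PySem.Dict.empty
  dominant.items

-- ===== PRECONDITION & SPEC =====
def Spec_compute_dominant_phases_py (matched : List (List (String × String))) (out : List (String × String)) : Prop := out = compute_dominant_phases_py_alt matched
instance (matched : List (List (String × String))) (out : List (String × String)) : Decidable (Spec_compute_dominant_phases_py matched out) := by unfold Spec_compute_dominant_phases_py; infer_instance

-- ===== CLAIM (what is proved, stated in full; the proofs are below) =====
def Claim_equal_compute_dominant_phases_py : Prop := ∀ (matched : List (List (String × String))), Dom_compute_dominant_phases_py matched → Spec_compute_dominant_phases_py matched (compute_dominant_phases_py matched)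

-- ===== LEMMAS AND PROOFS =====

-- ---- shared vocabulary ----

def extrP (a : List (String × String)) : String × String :=
  ((PySem.Dict.mk a).getD "device_type" "unclassified", (PySem.Dict.mk a).getD "phase" "")

def Lof (matched : List (List (String × String))) : List (String × String) :=
  (matched.map extrP).filter (fun q => decide (q.1 ≠ "unclassified" ∧ q.2 ≠ ""))

def phasesOf (L : List (String × String)) (c : String) : List String :=
  (L.filter (fun p => p.1 == c)).map Prod.snd

def winnerOf (L : List (String × String)) (c : String) : String :=
  (PySem.List.max? (PySem.Set.ofList (phasesOf L c))
    (fun x => ((phasesOf L c).count x : Int))).getD ""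

lemma phases_ne_nil (L : List (String × String)) (c : String)
    (hc : c ∈ PySem.Set.ofList (L.map Prod.fst)) : phasesOf L c ≠ [] := by
  have hc2 : c ∈ L.map Prod.fst := (PySem.Set.mem_ofList _ _).mp hc
  obtain ⟨q, hq, rfl⟩ := List.mem_map.mp hc2
  refine List.ne_nil_of_mem (a := q.2) ?_
  exact List.mem_map_of_mem (List.mem_filter.mpr ⟨hq, by simp⟩)

-- ---- A side ----

def nestStep (pc : PySem.Dict String (PySem.Dict String Int)) (p : String × String) : PySem.Dict String (PySem.Dict String Int) :=
  pc.modify p.1 PySem.Dict.empty (fun inner => inner.modify p.2 0 (· + 1))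

lemma nest_getD (L : List (String × String)) (d : PySem.Dict String (PySem.Dict String Int)) (c : String) :
    (L.foldl nestStep d).getD c PySem.Dict.empty
      = (phasesOf L c).foldl (fun inner x => inner.modify x 0 (· + 1)) (d.getD c PySem.Dict.empty) := by
  induction L generalizing d with
  | nil => simp [phasesOf]
  | cons p L ih =>
    simp only [List.foldl_cons, ih, nestStep, phasesOf, List.filter_cons]
    by_cases h : p.1 = c
    · subst h
      simp [PySem.Dict.modify, PySem.Dict.getD_insert_self]
    · have hne : c ≠ p.1 := fun hc => h hc.symm
      simp [PySem.Dict.modify, PySem.Dict.getD_insert, hne, h]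

def sndAStep (dom : PySem.Dict String String) (p : String × PySem.Dict String Int) :
    PySem.Dict String String :=
  if p.2.size ≠ 0 then
    match PySem.List.max? p.2.keys (fun k => p.2.getD k 0) with
    | some m => dom.insert p.1 m
    | none => dom
  else dom

lemma Aside (L : List (String × String)) :
    ((L.foldl nestStep PySem.Dict.empty).items.foldl sndAStep PySem.Dict.empty).items
      = (PySem.Set.ofList (L.map Prod.fst)).map (fun c => (c, winnerOf L c)) := by
  set P := L.foldl nestStep PySem.Dict.empty with hP
  have hkeys : P.keys = PySem.Set.ofList (L.map Prod.fst) := by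
    have hk : P.keys = PySem.Set.update (PySem.Dict.empty :
        PySem.Dict String (PySem.Dict String Int)).keys (L.map Prod.fst) :=
      PySem.Dict.keys_foldl_modify_key L Prod.fst PySem.Dict.empty
        (fun _ p => fun inner => inner.modify p.2 0 (· + 1)) PySem.Dict.empty
    rw [hk, PySem.Dict.keys_empty, PySem.Set.ofList_eq_foldl]
    rfl
  have hnod : P.keys.Nodup :=
    PySem.Dict.nodup_keys_foldl_modify_key L Prod.fst PySem.Dict.empty
      (fun _ p => fun inner => inner.modify p.2 0 (· + 1)) PySem.Dict.empty
      PySem.Dict.nodup_keys_empty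
  have hgetD : ∀ c, P.getD c PySem.Dict.empty = PySem.Dict.counter (phasesOf L c) := by
    intro c
    rw [hP, nest_getD, PySem.Dict.getD_empty, PySem.Dict.counter_eq_foldl]
  have hitems : P.items
      = (PySem.Set.ofList (L.map Prod.fst)).map
          (fun c => (c, PySem.Dict.counter (phasesOf L c))) := by
    rw [PySem.Dict.items_eq_map_keys P hnod PySem.Dict.empty, hkeys]
    exact List.map_congr_left (fun c _ => by rw [hgetD])
  have hcongr : P.items.foldl sndAStep PySem.Dict.empty
      = P.items.foldl (fun dom p =>
          dom.insert p.1 ((PySem.List.max? p.2.keys (fun k => p.2.getD k 0)).getD ""))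
          PySem.Dict.empty := by
    apply PySem.List.foldl_congr_mem
    intro acc p hp
    rw [hitems] at hp
    obtain ⟨c, hcK, rfl⟩ := List.mem_map.mp hp
    have hph := phases_ne_nil L c hcK
    have hkne : (PySem.Dict.counter (phasesOf L c)).keys ≠ [] := by
      rw [PySem.Dict.keys_counter]
      obtain ⟨x, hx⟩ := List.exists_mem_of_ne_nil _ hph
      exact List.ne_nil_of_mem ((PySem.Set.mem_ofList _ _).mpr hx)
    have hsz : (PySem.Dict.counter (phasesOf L c)).size ≠ 0 := by
      intro h0
      apply hkne
      have : (PySem.Dict.counter (phasesOf L c)).items = [] := List.length_eq_zero_iff.mp h0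
      simp only [PySem.Dict.keys, this, List.map_nil]
    cases hm : PySem.List.max? (PySem.Dict.counter (phasesOf L c)).keys
        (fun k => (PySem.Dict.counter (phasesOf L c)).getD k 0) with
    | none => exact absurd ((PySem.List.max?_eq_none_iff _ _).mp hm) hkne
    | some m =>
      simp only [PySem.Dict.keys_counter, PySem.Dict.getD_counter] at hm
      simp [sndAStep, hsz, hm]
  rw [hcongr]
  have hfresh := PySem.Dict.items_foldl_insert_fresh P.items Prod.fst
    (fun p => (PySem.List.max? p.2.keys (fun k => p.2.getD k 0)).getD "")
    PySem.Dict.empty (fun a _ => PySem.Dict.contains_empty a.1)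
    (by
      have : P.items.map Prod.fst = P.keys := rfl
      rw [this]; exact hnod)
  rw [hfresh]
  rw [show (PySem.Dict.empty : PySem.Dict String String).items = [] from rfl, List.nil_append]
  rw [hitems, List.map_map]
  refine List.map_congr_left (fun c _ => ?_)
  simp only [Function.comp]
  rw [winnerOf, PySem.Dict.keys_counter]
  congr 1
  refine congrArg (Option.getD · "") ?_
  refine congrArg _ ?_
  funext k
  rw [PySem.Dict.getD_counter]

lemma portA_eq (matched : List (List (String × String))) :
    compute_dominant_phases_py matched
      = (((Lof matched).foldl nestStep PySem.Dict.empty).items.foldl sndAStep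
          PySem.Dict.empty).items := by
  have h2 : (matched.map extrP).foldl
      (fun pc p => if p.1 ≠ "unclassified" ∧ p.2 ≠ "" then nestStep pc p else pc)
      PySem.Dict.empty
      = (Lof matched).foldl nestStep PySem.Dict.empty :=
    PySem.List.foldl_ite_eq_foldl_filter _ nestStep _ _
  have h1 : matched.foldl
      (fun pc a => if (extrP a).1 ≠ "unclassified" ∧ (extrP a).2 ≠ ""
        then nestStep pc (extrP a) else pc) PySem.Dict.empty
      = (Lof matched).foldl nestStep PySem.Dict.empty :=
    (List.foldl_map (f := extrP)
      (g := fun pc p => if p.1 ≠ "unclassified" ∧ p.2 ≠ "" then nestStep pc p else pc)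
      (l := matched) (init := PySem.Dict.empty)).symm.trans h2
  exact congrArg (fun d : PySem.Dict String (PySem.Dict String Int) =>
    (d.items.foldl sndAStep PySem.Dict.empty).items) h1

-- ---- B side ----

def bestStep (cnt : String → Int) (b : String × Int) (p : String) : String × Int :=
  if b.2 < cnt p then (p, cnt p) else b

def bestOf (ph : List String) : String :=
  (ph.foldl (bestStep (fun p => (ph.count p : Int))) ("", (0 : Int))).1

def sndBStep (L : List (String × String)) (dom : PySem.Dict String String)
    (q : String × String) : PySem.Dict String String :=
  if dom.contains q.1 then dom else dom.insert q.1 (bestOf (phasesOf L q.1))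

lemma portB_eq (matched : List (List (String × String))) :
    compute_dominant_phases_py_alt matched
      = ((Lof matched).foldl (sndBStep (Lof matched)) PySem.Dict.empty).items := by
  rfl

lemma add_prefix (l s : List String) : ∃ t, l.foldl PySem.Set.add s = s ++ t := by
  induction l generalizing s with
  | nil => exact ⟨[], by simp⟩
  | cons x l ih =>
    by_cases hx : x ∈ s
    · rw [List.foldl_cons, show PySem.Set.add s x = s by simp [PySem.Set.add, hx]]
      exact ih s
    · rw [List.foldl_cons, show PySem.Set.add s x = s ++ [x] by simp [PySem.Set.add, hx]]
      obtain ⟨t, ht⟩ := ih (s ++ [x])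
      exact ⟨x :: t, by simpa using ht⟩

lemma bestStep_snd_mono (cnt : String → Int) (b : String × Int) (p : String) :
    b.2 ≤ (bestStep cnt b p).2 := by
  unfold bestStep; split_ifs with h
  · exact le_of_lt h
  · exact le_rfl

lemma bestStep_snd_ge (cnt : String → Int) (b : String × Int) (p : String) :
    cnt p ≤ (bestStep cnt b p).2 := by
  unfold bestStep; split_ifs with h
  · exact le_rfl
  · exact le_of_not_gt h

lemma dedup_fold (cnt : String → Int) :
    ∀ (l seen : List String) (b : String × Int) (t : List String),
    (∀ x ∈ seen, ¬ b.2 < cnt x) →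
    l.foldl PySem.Set.add seen = seen ++ t →
    l.foldl (bestStep cnt) b = t.foldl (bestStep cnt) b := by
  intro l
  induction l with
  | nil =>
    intro seen b t _ hfold
    have : t = [] := by simpa using hfold.symm
    simp [this]
  | cons x l ih =>
    intro seen b t hb hfold
    by_cases hx : x ∈ seen
    · rw [List.foldl_cons, show bestStep cnt b x = b by
        unfold bestStep; rw [if_neg (hb x hx)]]
      refine ih seen b t hb ?_
      rw [List.foldl_cons, show PySem.Set.add seen x = seen by simp [PySem.Set.add, hx]] at hfold
      exact hfold
    · rw [List.foldl_cons, show PySem.Set.add seen x = seen ++ [x]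
          by simp [PySem.Set.add, hx]] at hfold
      obtain ⟨t', ht'⟩ := add_prefix l (seen ++ [x])
      have htx : t = x :: t' := by
        rw [ht'] at hfold
        have : seen ++ (x :: t') = seen ++ t := by simpa using hfold
        exact (List.append_cancel_left this).symm
      subst htx
      rw [List.foldl_cons, List.foldl_cons]
      refine ih (seen ++ [x]) (bestStep cnt b x) t' ?_ (by simpa using ht')
      intro y hy
      rcases List.mem_append.mp hy with h | h
      · exact not_lt_of_ge (le_trans (le_of_not_gt (hb y h)) (bestStep_snd_mono cnt b x))
      · rw [List.mem_singleton] at h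
        subst h
        exact not_lt_of_ge (bestStep_snd_ge cnt b y)

lemma fold_bestStep_ofList (cnt : String → Int) (l : List String) (b : String × Int) :
    l.foldl (bestStep cnt) b = (PySem.Set.ofList l).foldl (bestStep cnt) b :=
  dedup_fold cnt l [] b (PySem.Set.ofList l) (by simp)
    (by rw [← PySem.Set.ofList_eq_foldl]; simp)

lemma fold_best_eq_max? (cnt : String → Int) :
    ∀ (l : List String) (m : String),
    (l.foldl (bestStep cnt) (m, cnt m)).1 = (PySem.List.max? (m :: l) cnt).getD "" := by
  intro l
  induction l with
  | nil => intro m; simp [PySem.List.max?]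
  | cons x l ih =>
    intro m
    have hmax : PySem.List.max? (m :: x :: l) cnt
        = PySem.List.max? ((if cnt m < cnt x then x else m) :: l) cnt := by
      by_cases h : cnt m < cnt x <;> simp [PySem.List.max?, h]
    rw [List.foldl_cons, hmax]
    by_cases h : cnt m < cnt x
    · rw [show bestStep cnt (m, cnt m) x = (x, cnt x) by unfold bestStep; simp [h], if_pos h]
      exact ih x
    · rw [show bestStep cnt (m, cnt m) x = (m, cnt m) by unfold bestStep; simp [h], if_neg h]
      exact ih m

lemma innerEq (ph : List String) (hne : ph ≠ []) :
    bestOf ph = (PySem.List.max? (PySem.Set.ofList ph)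
        (fun x => ((ph.count x : Nat) : Int))).getD "" := by
  set cnt : String → Int := fun p => ((ph.count p : Nat) : Int) with hcnt
  rw [bestOf, fold_bestStep_ofList]
  cases hS : PySem.Set.ofList ph with
  | nil =>
    exfalso
    obtain ⟨x, hx⟩ := List.exists_mem_of_ne_nil _ hne
    have : x ∈ PySem.Set.ofList ph := (PySem.Set.mem_ofList _ _).mpr hx
    rw [hS] at this; cases this
  | cons y rest =>
    have hy : y ∈ ph := by
      have : y ∈ PySem.Set.ofList ph := by rw [hS]; exact List.mem_cons_self
      exact (PySem.Set.mem_ofList _ _).mp this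
    have hpos : (0 : Int) < cnt y := by
      simpa [hcnt] using Int.natCast_pos.mpr (List.count_pos_iff.mpr hy)
    rw [List.foldl_cons,
      show bestStep cnt ("", (0 : Int)) y = (y, cnt y) by unfold bestStep; simp [hpos]]
    rw [fold_best_eq_max? cnt rest y, ← hS]

lemma Bouter (g : String → String) (L : List (String × String)) :
    (L.foldl (fun dom q => if dom.contains q.1 then dom else dom.insert q.1 (g q.1))
        PySem.Dict.empty).items
      = (PySem.Set.ofList (L.map Prod.fst)).map (fun c => (c, g c)) := by
  induction L using List.reverseRecOn with
  | nil => rfl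
  | append_singleton L q ih =>
    rw [List.foldl_append, List.foldl_cons, List.foldl_nil]
    set D := L.foldl (fun dom q => if dom.contains q.1 then dom else dom.insert q.1 (g q.1))
        PySem.Dict.empty with hD
    have hkeys : D.keys = PySem.Set.ofList (L.map Prod.fst) := by
      have : D.keys = D.items.map Prod.fst := rfl
      rw [this, ih, List.map_map]
      exact (List.map_congr_left fun c _ => rfl).trans (List.map_id' _)
    have hset : PySem.Set.ofList ((L ++ [q]).map Prod.fst)
        = PySem.Set.add (PySem.Set.ofList (L.map Prod.fst)) q.1 := by
      rw [PySem.Set.ofList_eq_foldl, PySem.Set.ofList_eq_foldl]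
      simp [List.foldl_append]
    by_cases hq : q.1 ∈ PySem.Set.ofList (L.map Prod.fst)
    · have hc : D.contains q.1 = true := by
        rw [PySem.Dict.contains_eq_decide_mem_keys, hkeys]
        simpa using hq
      rw [if_pos hc, hset, show PySem.Set.add (PySem.Set.ofList (L.map Prod.fst)) q.1
          = PySem.Set.ofList (L.map Prod.fst) by simp [PySem.Set.add, hq], ih]
    · have hc : D.contains q.1 = false := by
        rw [PySem.Dict.contains_eq_decide_mem_keys, hkeys]
        simpa using hq
      rw [if_neg (by simp [hc]), PySem.Dict.items_insert_of_not_contains _ _ hc, ih, hset,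
        show PySem.Set.add (PySem.Set.ofList (L.map Prod.fst)) q.1
          = PySem.Set.ofList (L.map Prod.fst) ++ [q.1] by simp [PySem.Set.add, hq]]
      simp

lemma Bside (matched : List (List (String × String))) :
    compute_dominant_phases_py_alt matched
      = (PySem.Set.ofList ((Lof matched).map Prod.fst)).map
          (fun c => (c, winnerOf (Lof matched) c)) := by
  rw [portB_eq]
  have h := Bouter (fun c => bestOf (phasesOf (Lof matched) c)) (Lof matched)
  rw [show (Lof matched).foldl (sndBStep (Lof matched)) PySem.Dict.empty
      = (Lof matched).foldl (fun dom q => if dom.contains q.1 then dom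
          else dom.insert q.1 (bestOf (phasesOf (Lof matched) q.1))) PySem.Dict.empty from rfl]
  rw [h]
  refine List.map_congr_left (fun c hc => ?_)
  rw [innerEq _ (phases_ne_nil _ _ hc), winnerOf]

-- ===== VERDICT (by name: the statement is the Claim_ definition above) =====
theorem compute_dominant_phases_py_spec : Claim_equal_compute_dominant_phases_py := by
  intro matched _
  unfold Spec_compute_dominant_phases_py
  rw [portA_eq, Aside, Bside]
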